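-- pv_equiv track=rewrite | github.com/ArianDJ-ALT/school-plusklas | main.py | plan_meetings
-- ===== SOURCE A (Python) =====
-- from collections import defaultdict
-- import itertools
--
-- def plan_meetings(class_teachers, start_time, end_time, meeting_duration=30, rooms=None):
--     if rooms is None:
--         rooms = ["222", "223", "224"]
--
--     # Maak een lijst met tijdslots
--     time_slots = []
--     current_time = start_time
--     while current_time < end_time:
--         time_slots.append(current_time)
--         current_time += meeting_duration
--
--     # Plan gesprekken per tijdslot
--     schedule = defaultdict(list)
--     available_teachers = {teacher: True for teacher in set(itertools.chain(*class_teachers.values()))}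
--
--     for time_slot in time_slots:
--         for room in rooms:
--             for class_group, teachers in class_teachers.items():
--                 if all(available_teachers[teacher] for teacher in teachers):
--                     schedule[time_slot].append((room, class_group, teachers))
--                     for teacher in teachers:
--                         available_teachers[teacher] = False
--                     break
--     return schedule
-- ===== SOURCE B (Python) =====
-- from collections import defaultdict
--
-- def plan_meetings(class_teachers, start_time, end_time, meeting_duration=30, rooms=None):
--     if rooms is None:
--         rooms = ["222", "223", "224"]
--
--     schedule = defaultdict(list)
--     if not rooms:
--         return schedule
--
--     # One global greedy pass: teacher availability only ever shrinks, so the classes A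
--     # ever assigns are exactly the greedy selection in dict order; then chunk them
--     # len(rooms) at a time across the time slots.
--     busy = set()
--     chosen = []
--     for class_group, teachers in class_teachers.items():
--         if busy.isdisjoint(teachers):
--             chosen.append((class_group, teachers))
--             busy.update(teachers)
--
--     t = start_time
--     i = 0
--     while t < end_time and i < len(chosen):
--         for room, (class_group, teachers) in zip(rooms, chosen[i:i + len(rooms)]):
--             schedule[t].append((room, class_group, teachers))
--         i += len(rooms)
--         t += meeting_duration
--     return schedule
-- ===== Notes on version B (the rewrite author's own statement) =====
-- stated objective: alternative
-- what changed: A interleaves selection and scheduling with nested slot-by-room rescans of the class dict over a mutable availability dict; B computes the greedy class selection once in a single pass with a busy set (availability only ever shrinks, so A's picks are exactly this sequence) and then slices it rooms-sized chunk by chunk onto the time slots.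
import Mathlib
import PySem

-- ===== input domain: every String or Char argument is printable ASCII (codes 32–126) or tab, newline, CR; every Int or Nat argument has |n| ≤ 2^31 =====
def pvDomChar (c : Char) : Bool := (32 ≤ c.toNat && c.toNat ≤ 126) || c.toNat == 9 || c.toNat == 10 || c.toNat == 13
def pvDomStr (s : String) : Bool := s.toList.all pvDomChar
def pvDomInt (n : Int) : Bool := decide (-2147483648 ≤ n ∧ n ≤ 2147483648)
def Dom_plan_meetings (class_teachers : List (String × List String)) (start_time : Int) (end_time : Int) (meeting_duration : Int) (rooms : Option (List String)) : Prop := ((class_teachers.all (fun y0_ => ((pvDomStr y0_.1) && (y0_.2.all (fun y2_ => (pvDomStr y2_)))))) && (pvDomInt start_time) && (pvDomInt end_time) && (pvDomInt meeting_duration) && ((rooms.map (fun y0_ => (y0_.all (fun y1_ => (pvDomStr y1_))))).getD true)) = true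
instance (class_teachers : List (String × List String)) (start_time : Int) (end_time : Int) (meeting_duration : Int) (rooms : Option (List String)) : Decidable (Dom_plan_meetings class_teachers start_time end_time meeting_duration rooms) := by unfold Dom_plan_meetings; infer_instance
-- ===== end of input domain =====

-- B replaces A's nested slot×room×class rescans over a mutable availability dict by computing
-- the greedy class selection ONCE (single pass, busy set) and then slicing it rooms-sized
-- chunk by chunk onto the time slots (an alternative decomposition; availability only shrinks,
-- so A's picks are exactly that one greedy sequence).

-- ===== PORT A =====
-- 'all(available_teachers[teacher] for teacher in teachers)' (every teacher is a key, so the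
-- getD default is never read)
def pvAllAvail (avail : PySem.Dict String Bool) (ts : List String) : Bool :=
  ts.all (fun t => avail.getD t true)
-- 'for teacher in teachers: available_teachers[teacher] = False'
def pvMarkBusy (avail : PySem.Dict String Bool) (ts : List String) : PySem.Dict String Bool :=
  ts.foldl (fun d t => d.insert t false) avail
-- '{teacher: True for teacher in set(itertools.chain(*class_teachers.values()))}'
-- (a Python set's iteration order is not modelled; the dict built here is only ever looked up,
-- so the result does not depend on that order)
def pvInitAvail (items : List (String × List String)) : PySem.Dict String Bool :=
  (PySem.Set.ofList (items.flatMap (fun p => p.2))).foldl (fun d t => d.insert t true) PySem.Dict.empty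

-- A's while-loop building time_slots (the 'dur ≤ 0' guard only totalises the inputs on which
-- the Python while-loop diverges; those are outside Pre_)
def pvWhileSlots (cur fin dur : Int) : List Int :=
  if cur < fin then
    if _h : 0 < dur then cur :: pvWhileSlots (cur + dur) fin dur
    else []
  else []
termination_by (fin - cur).toNat
decreasing_by omega

-- inner 'for class_group, teachers in class_teachers.items(): if all(...): ...; break'
def pvFindAvail (avail : PySem.Dict String Bool) : List (String × List String) → Option (String × List String)
  | [] => none
  | c :: rest => if pvAllAvail avail c.2 then some c else pvFindAvail avail rest

-- 'for room in rooms: ...' — each room rescans the full class list from the start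
def pvFillRooms : List String → List (String × List String) → PySem.Dict String Bool →
    (List (String × String × List String) × PySem.Dict String Bool)
  | [], _, avail => ([], avail)
  | room :: rs, classes, avail =>
    match pvFindAvail avail classes with
    | none => pvFillRooms rs classes avail
    | some (cg, ts) =>
      let r := pvFillRooms rs classes (pvMarkBusy avail ts)
      ((room, cg, ts) :: r.1, r.2)

def plan_meetings (class_teachers : List (String × List String)) (start_time : Int) (end_time : Int) (meeting_duration : Int) (rooms : Option (List String)) : List (Int × List (String × String × List String)) :=
  let roomsL := rooms.getD ["222", "223", "224"]
  let items := (PySem.Dict.ofList class_teachers).items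
  let slots := pvWhileSlots start_time end_time meeting_duration
  (slots.foldl (fun acc slot =>
      let r := pvFillRooms roomsL items acc.2
      (if r.1.isEmpty then acc.1 else acc.1 ++ [(slot, r.1)], r.2))
    (([] : List (Int × List (String × String × List String))), pvInitAvail items)).1

-- ===== PORT B =====
-- B's single pass: 'if busy.isdisjoint(teachers): chosen.append(...); busy.update(teachers)'
def pvChoose (busy : PySem.Set String) : List (String × List String) → List (String × List String)
  | [] => []
  | (cg, ts) :: rest =>
    if PySem.Set.isdisjoint busy ts then
      (cg, ts) :: pvChoose (PySem.Set.update busy ts) rest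
    else pvChoose busy rest

-- B's while loop: 'while t < end_time and i < len(chosen): zip(rooms, chosen[i:i+len(rooms)]) …'
-- (the remaining chosen list stands for chosen[i:]; it shrinks each iteration, so this loop
-- terminates regardless of the step sign, exactly like the Python)
def pvChunkLoop (room : String) (rs : List String) (fin step : Int) :
    Int → List (String × List String) → List (Int × List (String × String × List String))
  | _, [] => []
  | t, c :: rest =>
    if t < fin then
      (t, (room :: rs).zip ((c :: rest).take (rs.length + 1))) ::
        pvChunkLoop room rs fin step (t + step) (rest.drop rs.length)
    else []
termination_by _ chosen => chosen.length
decreasing_by simp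

def plan_meetings_alt (class_teachers : List (String × List String)) (start_time : Int) (end_time : Int) (meeting_duration : Int) (rooms : Option (List String)) : List (Int × List (String × String × List String)) :=
  let roomsL := rooms.getD ["222", "223", "224"]
  match roomsL with
  | [] => []
  | room :: rs =>
    pvChunkLoop room rs end_time meeting_duration start_time
      (pvChoose PySem.Set.empty (PySem.Dict.ofList class_teachers).items)

-- ===== PRECONDITION & SPEC =====
-- Pre_ excludes (i) meeting_duration ≤ 0 with start_time < end_time, on which both Pythons loop
-- forever, and (ii) inputs with at least one time slot and one room where some class maps to the
-- EMPTY teacher list — a degenerate corner nobody would specify, where A happens to re-assign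
-- that class to every room of every slot while B assigns it exactly once.
def Pre_plan_meetings (class_teachers : List (String × List String)) (start_time : Int) (end_time : Int) (meeting_duration : Int) (rooms : Option (List String)) : Prop :=
  (start_time < end_time → 0 < meeting_duration) ∧
  (start_time < end_time → rooms.getD ["222", "223", "224"] ≠ [] →
    ∀ p ∈ class_teachers, p.2 ≠ [])
instance (class_teachers : List (String × List String)) (start_time : Int) (end_time : Int) (meeting_duration : Int) (rooms : Option (List String)) : Decidable (Pre_plan_meetings class_teachers start_time end_time meeting_duration rooms) := by unfold Pre_plan_meetings; infer_instance

def pvWitness_plan_meetings : (List (String × List String)) × Int × Int × Int × Option (List String) :=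
  ([("1A", ["ann"]), ("2B", ["bob"])], 0, 60, 30, none)

def Spec_plan_meetings (class_teachers : List (String × List String)) (start_time : Int) (end_time : Int) (meeting_duration : Int) (rooms : Option (List String)) (out : List (Int × List (String × String × List String))) : Prop := out = plan_meetings_alt class_teachers start_time end_time meeting_duration rooms
instance (class_teachers : List (String × List String)) (start_time : Int) (end_time : Int) (meeting_duration : Int) (rooms : Option (List String)) (out : List (Int × List (String × String × List String))) : Decidable (Spec_plan_meetings class_teachers start_time end_time meeting_duration rooms out) := by unfold Spec_plan_meetings; infer_instance

-- ===== CLAIM (what is proved, stated in full; the proofs are below) =====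
def Claim_equal_plan_meetings : Prop := ∀ (class_teachers : List (String × List String)) (start_time : Int) (end_time : Int) (meeting_duration : Int) (rooms : Option (List String)), Dom_plan_meetings class_teachers start_time end_time meeting_duration rooms → Pre_plan_meetings class_teachers start_time end_time meeting_duration rooms → Spec_plan_meetings class_teachers start_time end_time meeting_duration rooms (plan_meetings class_teachers start_time end_time meeting_duration rooms)

-- ===== LEMMAS AND PROOFS =====

theorem pvWitness_ok : Dom_plan_meetings pvWitness_plan_meetings.1 pvWitness_plan_meetings.2.1 pvWitness_plan_meetings.2.2.1 pvWitness_plan_meetings.2.2.2.1 pvWitness_plan_meetings.2.2.2.2 ∧ Pre_plan_meetings pvWitness_plan_meetings.1 pvWitness_plan_meetings.2.1 pvWitness_plan_meetings.2.2.1 pvWitness_plan_meetings.2.2.2.1 pvWitness_plan_meetings.2.2.2.2 := by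
  decide

-- proof-side bridge: A's per-slot room loop as a single cursor pass over the classes
def pvFillPass : List (String × List String) → List String → PySem.Dict String Bool →
    (List (String × String × List String) × PySem.Dict String Bool)
  | [], _, avail => ([], avail)
  | (cg, ts) :: cl, rooms, avail =>
    match rooms with
    | [] => ([], avail)
    | room :: rs =>
      if pvAllAvail avail ts then
        let r := pvFillPass cl rs (pvMarkBusy avail ts)
        ((room, cg, ts) :: r.1, r.2)
      else pvFillPass cl (room :: rs) avail

-- the availability-dict / busy-set correspondence carried through the proof
def pvHA (a : PySem.Dict String Bool) (busy : PySem.Set String) : Prop :=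
  ∀ t : String, a.getD t true = !(decide (t ∈ busy))

-- a teacher recorded available after marking was available before
theorem getD_markBusy_true (l : List String) : ∀ (a : PySem.Dict String Bool) (t : String),
    (pvMarkBusy a l).getD t true = true → a.getD t true = true := by
  induction l with
  | nil => intro a t h; exact h
  | cons x l ih =>
    intro a t h
    have h' := ih (a.insert x false) t h
    rw [PySem.Dict.getD_insert] at h'
    by_cases hx : t = x
    · simp [hx] at h'
    · simpa [hx] using h'

-- marking teachers busy never makes an unavailable class available
theorem allAvail_mono (ts l : List String) (a : PySem.Dict String Bool)
    (h : pvAllAvail a ts = false) : pvAllAvail (pvMarkBusy a l) ts = false := by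
  rcases Bool.eq_false_or_eq_true (pvAllAvail (pvMarkBusy a l) ts) with h1 | h1
  swap
  · exact h1
  · exfalso
    unfold pvAllAvail at h h1
    rw [List.all_eq_true] at h1
    have : ts.all (fun t => a.getD t true) = true :=
      List.all_eq_true.mpr fun t ht => getD_markBusy_true l a t (h1 t ht)
    rw [this] at h
    cases h

theorem getD_markBusy_false (l : List String) (a : PySem.Dict String Bool) (t : String)
    (h : a.getD t true = false) : (pvMarkBusy a l).getD t true = false := by
  rcases Bool.eq_false_or_eq_true ((pvMarkBusy a l).getD t true) with h1 | h1
  · rw [getD_markBusy_true l a t h1] at h; cases h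
  · exact h1

theorem mem_markBusy_false (l : List String) : ∀ (a : PySem.Dict String Bool) (t : String),
    t ∈ l → (pvMarkBusy a l).getD t true = false := by
  induction l with
  | nil => intro a t h; cases h
  | cons x l ih =>
    intro a t h
    rcases List.mem_cons.mp h with h | h
    · subst h
      exact getD_markBusy_false l (a.insert t false) t (by simp)
    · exact ih (a.insert x false) t h

-- a class with a nonempty teacher list is unavailable after its own teachers are marked busy
theorem allAvail_markBusy_self (ts : List String) (a : PySem.Dict String Bool) (h : ts ≠ []) :
    pvAllAvail (pvMarkBusy a ts) ts = false := by
  cases ts with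
  | nil => exact absurd rfl h
  | cons t ts' =>
    unfold pvAllAvail
    rcases Bool.eq_false_or_eq_true ((t :: ts').all fun u => (pvMarkBusy a (t :: ts')).getD u true) with h1 | h1
    swap
    · exact h1
    · have := List.all_eq_true.mp h1 t List.mem_cons_self
      rw [mem_markBusy_false (t :: ts') a t List.mem_cons_self] at this
      cases this

-- a prefix of unavailable classes is skipped by the scan
theorem findAvail_append (P Q : List (String × List String)) (a : PySem.Dict String Bool)
    (h : ∀ c ∈ P, pvAllAvail a c.2 = false) :
    pvFindAvail a (P ++ Q) = pvFindAvail a Q := by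
  induction P with
  | nil => rfl
  | cons c P ih =>
    rw [List.cons_append, pvFindAvail, h c List.mem_cons_self]
    simp only [Bool.false_eq_true, if_false]
    exact ih fun c hc => h c (List.mem_cons_of_mem _ hc)

theorem findAvail_none (P : List (String × List String)) (a : PySem.Dict String Bool)
    (h : ∀ c ∈ P, pvAllAvail a c.2 = false) : pvFindAvail a P = none := by
  have := findAvail_append P [] a h
  rwa [List.append_nil] at this

-- with only unavailable classes, A's room loop appends nothing and leaves the dict unchanged
theorem fillRooms_none (rooms : List String) (P : List (String × List String))
    (a : PySem.Dict String Bool) (h : ∀ c ∈ P, pvAllAvail a c.2 = false) :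
    pvFillRooms rooms P a = ([], a) := by
  induction rooms with
  | nil => rfl
  | cons r rs ih => rw [pvFillRooms, findAvail_none P a h]; exact ih

-- A's per-room rescan of (unavailable prefix P ++ remaining classes Q) equals one cursor pass
theorem fill_eq (Q : List (String × List String)) :
    ∀ (rooms : List String) (P : List (String × List String)) (a : PySem.Dict String Bool),
    (∀ c ∈ P, pvAllAvail a c.2 = false) → (∀ c ∈ Q, c.2 ≠ []) →
    pvFillRooms rooms (P ++ Q) a = pvFillPass Q rooms a := by
  induction Q with
  | nil =>
    intro rooms P a hP _
    rw [List.append_nil, fillRooms_none rooms P a hP]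
    rfl
  | cons c Q ih =>
    intro rooms P a hP hQ
    obtain ⟨cg, ts⟩ := c
    cases rooms with
    | nil => rfl
    | cons r rs =>
      have hsplit : P ++ (cg, ts) :: Q = (P ++ [(cg, ts)]) ++ Q := by simp
      rcases Bool.eq_false_or_eq_true (pvAllAvail a ts) with hA | hA
      · -- class available: both assign it the next room and mark its teachers busy
        have hfa : pvFindAvail a (P ++ (cg, ts) :: Q) = some (cg, ts) := by
          rw [findAvail_append P _ a hP, pvFindAvail, hA]
          simp
        have hP' : ∀ c ∈ P ++ [(cg, ts)], pvAllAvail (pvMarkBusy a ts) c.2 = false := by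
          intro c hc
          rcases List.mem_append.mp hc with hc | hc
          · exact allAvail_mono c.2 ts a (hP c hc)
          · rw [List.mem_singleton.mp hc]
            exact allAvail_markBusy_self ts a (hQ (cg, ts) List.mem_cons_self)
        have key : pvFillRooms rs (P ++ (cg, ts) :: Q) (pvMarkBusy a ts) = pvFillPass Q rs (pvMarkBusy a ts) := by
          rw [hsplit]
          exact ih rs (P ++ [(cg, ts)]) (pvMarkBusy a ts) hP' fun c hc => hQ c (List.mem_cons_of_mem _ hc)
        rw [pvFillRooms, hfa]
        simp only [pvFillPass, hA, if_true, key]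
      · -- class unavailable: A skips it in every rescan, the cursor pass advances
        have hP' : ∀ c ∈ P ++ [(cg, ts)], pvAllAvail a c.2 = false := by
          intro c hc
          rcases List.mem_append.mp hc with hc | hc
          · exact hP c hc
          · rw [List.mem_singleton.mp hc]; exact hA
        rw [hsplit, ih (r :: rs) (P ++ [(cg, ts)]) a hP' fun c hc => hQ c (List.mem_cons_of_mem _ hc)]
        simp only [pvFillPass, hA, Bool.false_eq_true, if_false]

-- the cursor pass only marks teachers busy: availability never grows
theorem fillPass_getD_true (cl : List (String × List String)) :
    ∀ (rooms : List String) (a : PySem.Dict String Bool) (t : String),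
    (pvFillPass cl rooms a).2.getD t true = true → a.getD t true = true := by
  induction cl with
  | nil => intro rooms a t h; exact h
  | cons c cl ih =>
    obtain ⟨cg, ts⟩ := c
    intro rooms a t h
    cases rooms with
    | nil => exact h
    | cons r rs =>
      by_cases hA : pvAllAvail a ts = true
      · simp only [pvFillPass, hA, if_true] at h
        exact getD_markBusy_true ts a t (ih rs (pvMarkBusy a ts) t h)
      · simp only [pvFillPass, hA] at h
        exact ih (r :: rs) a t h

theorem allAvail_fillPass_mono (cl : List (String × List String)) (rooms : List String)
    (a : PySem.Dict String Bool) (ts : List String) (h : pvAllAvail a ts = false) :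
    pvAllAvail (pvFillPass cl rooms a).2 ts = false := by
  rcases Bool.eq_false_or_eq_true (pvAllAvail (pvFillPass cl rooms a).2 ts) with h1 | h1
  swap
  · exact h1
  · exfalso
    unfold pvAllAvail at h h1
    rw [List.all_eq_true] at h1
    have : ts.all (fun t => a.getD t true) = true :=
      List.all_eq_true.mpr fun t ht => fillPass_getD_true cl rooms a t (h1 t ht)
    rw [this] at h
    cases h

-- the availability test through the correspondence
theorem availEq (a : PySem.Dict String Bool) (busy : PySem.Set String) (ts : List String)
    (hHA : pvHA a busy) : pvAllAvail a ts = PySem.Set.isdisjoint busy ts := by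
  have h1 : pvAllAvail a ts = true ↔ ∀ u ∈ ts, u ∉ busy := by
    unfold pvAllAvail
    rw [List.all_eq_true]
    constructor
    · intro h u hu
      have := h u hu
      rw [hHA u] at this
      simpa using this
    · intro h u hu
      rw [hHA u]
      simpa using h u hu
  cases hA : pvAllAvail a ts with
  | true =>
    exact ((PySem.Set.isdisjoint_iff busy ts).mpr fun x hx hxt => (h1.mp hA) x hxt hx).symm
  | false =>
    cases hb : PySem.Set.isdisjoint busy ts with
    | false => rfl
    | true =>
      exfalso
      have hall := h1.mpr fun u hu hub => (PySem.Set.isdisjoint_iff busy ts).mp hb u hub hu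
      rw [hA] at hall
      cases hall

-- marking busy preserves the correspondence
theorem pvHA_mark (ts : List String) : ∀ (a : PySem.Dict String Bool) (busy : PySem.Set String),
    pvHA a busy → pvHA (pvMarkBusy a ts) (PySem.Set.update busy ts) := by
  induction ts with
  | nil =>
    intro a busy h
    simpa [pvMarkBusy, PySem.Set.update] using h
  | cons t ts ih =>
    intro a busy h
    have h' : pvHA (a.insert t false) (PySem.Set.add busy t) := by
      intro u
      rw [PySem.Dict.getD_insert]
      by_cases hu : u = t
      · simp [hu, PySem.Set.mem_add]
      · have hmem : (u ∈ PySem.Set.add busy t) ↔ u ∈ busy := by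
          rw [PySem.Set.mem_add]
          simp [hu]
        simp only [hu, if_false]
        rw [h u]
        simp [hmem]
    have hm : pvMarkBusy a (t :: ts) = pvMarkBusy (a.insert t false) ts := rfl
    have hu : PySem.Set.update busy (t :: ts) = PySem.Set.update (PySem.Set.add busy t) ts :=
      PySem.Set.update_cons busy t ts
    rw [hm, hu]
    exact ih _ _ h'

-- the initial dict marks every teacher available
theorem getD_fold_true (l : List String) : ∀ (d : PySem.Dict String Bool),
    (∀ v, d.getD v true = true) → ∀ u, (l.foldl (fun d t => d.insert t true) d).getD u true = true := by
  induction l with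
  | nil => intro d h u; exact h u
  | cons x l ih =>
    intro d h u
    apply ih
    intro v
    rw [PySem.Dict.getD_insert]
    by_cases hv : v = x
    · simp [hv]
    · simp [hv, h v]

theorem pvHA_init (items : List (String × List String)) :
    pvHA (pvInitAvail items) PySem.Set.empty := by
  intro u
  unfold pvInitAvail
  rw [getD_fold_true _ PySem.Dict.empty (fun v => by simp) u]
  simp [PySem.Set.empty]

-- zip truncates, so zipping with the rooms-sized slice is zipping with the whole tail
theorem zip_take_right {α β : Type} : ∀ (xs : List α) (ys : List β),
    xs.zip (ys.take xs.length) = xs.zip ys := by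
  intro xs
  induction xs with
  | nil => intro ys; simp
  | cons x xs ih =>
    intro ys
    cases ys with
    | nil => simp
    | cons y ys => simp [ih]

-- SLOT: one cursor pass picks the next rooms-many elements of the global greedy selection,
-- and leaves a state in which the rest of the selection is still what remains to schedule
theorem slot_main (rem : List (String × List String)) :
    ∀ (rooms' : List String) (a : PySem.Dict String Bool) (busy : PySem.Set String),
    pvHA a busy → (∀ c ∈ rem, c.2 ≠ []) →
    (pvFillPass rem rooms' a).1 = rooms'.zip (pvChoose busy rem) ∧
    ∃ P2 rem2 busy2, rem = P2 ++ rem2 ∧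
      (∀ c ∈ P2, pvAllAvail (pvFillPass rem rooms' a).2 c.2 = false) ∧
      pvHA (pvFillPass rem rooms' a).2 busy2 ∧
      pvChoose busy2 rem2 = (pvChoose busy rem).drop rooms'.length := by
  induction rem with
  | nil =>
    intro rooms' a busy hHA _
    refine ⟨by simp [pvFillPass, pvChoose], [], [], busy, rfl, by simp, ?_, by simp [pvChoose]⟩
    simpa [pvFillPass] using hHA
  | cons c cl ih =>
    obtain ⟨cg, ts⟩ := c
    intro rooms' a busy hHA hne
    cases rooms' with
    | nil =>
      exact ⟨by simp [pvFillPass], [], (cg, ts) :: cl, busy,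
        rfl, by simp, by simpa [pvFillPass] using hHA, by simp⟩
    | cons r rs =>
      have havEq : pvAllAvail a ts = PySem.Set.isdisjoint busy ts := availEq a busy ts hHA
      cases hA : pvAllAvail a ts with
      | false =>
        -- class blocked: the pass skips it, the greedy selection skips it
        have hdisj : PySem.Set.isdisjoint busy ts = false := havEq.symm.trans hA
        have hfp : pvFillPass ((cg, ts) :: cl) (r :: rs) a = pvFillPass cl (r :: rs) a := by
          simp [pvFillPass, hA]
        have hch : pvChoose busy ((cg, ts) :: cl) = pvChoose busy cl := by
          simp [pvChoose, hdisj]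
        obtain ⟨ih1, P2, rem2, busy2, hsp, hP2, hHA2, hdr⟩ :=
          ih (r :: rs) a busy hHA (fun c hc => hne c (List.mem_cons_of_mem _ hc))
        refine ⟨by rw [hfp, hch]; exact ih1, (cg, ts) :: P2, rem2, busy2, by simp [hsp], ?_, ?_, ?_⟩
        · intro c hc
          rcases List.mem_cons.mp hc with hc | hc
          · rw [hc, hfp]
            exact allAvail_fillPass_mono cl (r :: rs) a ts hA
          · rw [hfp]; exact hP2 c hc
        · rw [hfp]; exact hHA2
        · rw [hdr, hch]
      | true =>
        -- class available: the pass assigns it the next room, the greedy selection keeps it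
        have hdisj : PySem.Set.isdisjoint busy ts = true := havEq.symm.trans hA
        have hts : ts ≠ [] := hne (cg, ts) List.mem_cons_self
        have hfp : pvFillPass ((cg, ts) :: cl) (r :: rs) a
            = ((r, cg, ts) :: (pvFillPass cl rs (pvMarkBusy a ts)).1,
               (pvFillPass cl rs (pvMarkBusy a ts)).2) := by
          simp [pvFillPass, hA]
        have hch : pvChoose busy ((cg, ts) :: cl)
            = (cg, ts) :: pvChoose (PySem.Set.update busy ts) cl := by
          simp [pvChoose, hdisj]
        obtain ⟨ih1, P2, rem2, busy2, hsp, hP2, hHA2, hdr⟩ :=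
          ih rs (pvMarkBusy a ts) (PySem.Set.update busy ts) (pvHA_mark ts a busy hHA)
            (fun c hc => hne c (List.mem_cons_of_mem _ hc))
        refine ⟨by rw [hfp, hch]; simp [ih1], (cg, ts) :: P2, rem2, busy2, by simp [hsp], ?_, ?_, ?_⟩
        · intro c hc
          rcases List.mem_cons.mp hc with hc | hc
          · rw [hc, hfp]
            exact allAvail_fillPass_mono cl rs (pvMarkBusy a ts) ts (allAvail_markBusy_self ts a hts)
          · rw [hfp]; exact hP2 c hc
        · rw [hfp]; exact hHA2
        · rw [hdr, hch]
          simp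

-- MAIN: A's fold over the time slots equals chunking the global greedy selection
theorem pv_main (et dur : Int) (hdur : 0 < dur) (room : String) (rs : List String)
    (items : List (String × List String)) (hne : ∀ c ∈ items, c.2 ≠ []) :
    ∀ (n : Nat) (cur : Int), (et - cur).toNat = n →
    ∀ (P rem : List (String × List String)) (a : PySem.Dict String Bool) (busy : PySem.Set String)
      (pref : List (Int × List (String × String × List String))),
      items = P ++ rem → (∀ c ∈ P, pvAllAvail a c.2 = false) → pvHA a busy →
      ((pvWhileSlots cur et dur).foldl (fun acc slot =>
          let r := pvFillRooms (room :: rs) items acc.2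
          (if r.1.isEmpty then acc.1 else acc.1 ++ [(slot, r.1)], r.2)) (pref, a)).1
        = pref ++ pvChunkLoop room rs et dur cur (pvChoose busy rem) := by
  intro n
  induction n using Nat.strong_induction_on with
  | _ n ihn =>
    intro cur hn P rem a busy pref hitems hP hHA
    rw [pvWhileSlots]
    by_cases hcur : cur < et
    · rw [if_pos hcur, dif_pos hdur]
      simp only [List.foldl_cons]
      have hrem_ne : ∀ c ∈ rem, c.2 ≠ [] := fun c hc =>
        hne c (hitems ▸ List.mem_append_right P hc)
      have hfe : pvFillRooms (room :: rs) items a = pvFillPass rem (room :: rs) a := by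
        rw [hitems]
        exact fill_eq rem (room :: rs) P a hP hrem_ne
      obtain ⟨hfst, P2, rem2, busy2, hsplit, hP2, hHA2, hdrop⟩ :=
        slot_main rem (room :: rs) a busy hHA hrem_ne
      have hitems' : items = (P ++ P2) ++ rem2 := by rw [hitems, hsplit, List.append_assoc]
      have hP' : ∀ c ∈ P ++ P2, pvAllAvail (pvFillPass rem (room :: rs) a).2 c.2 = false := by
        intro c hc
        rcases List.mem_append.mp hc with hc | hc
        · exact allAvail_fillPass_mono rem (room :: rs) a c.2 (hP c hc)
        · exact hP2 c hc
      cases hch : pvChoose busy rem with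
      | nil =>
        have hempty : (pvFillPass rem (room :: rs) a).1 = [] := by rw [hfst, hch]; simp
        have hrec := ihn ((et - (cur + dur)).toNat) (by omega) (cur + dur) rfl
          (P ++ P2) rem2 (pvFillPass rem (room :: rs) a).2 busy2 pref hitems' hP' hHA2
        have hdr : pvChoose busy2 rem2 = [] := by rw [hdrop, hch]; simp
        simp only [hfe, hempty, List.isEmpty_nil, if_true]
        rw [hrec, hdr]
        simp [pvChunkLoop]
      | cons c rest' =>
        have hsome : (pvFillPass rem (room :: rs) a).1 = (room :: rs).zip (c :: rest') := by
          rw [hfst, hch]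
        have hnonempty : ((room :: rs).zip (c :: rest')).isEmpty = false := by
          simp [List.zip_cons_cons]
        have hrec := ihn ((et - (cur + dur)).toNat) (by omega) (cur + dur) rfl
          (P ++ P2) rem2 (pvFillPass rem (room :: rs) a).2 busy2
          (pref ++ [(cur, (room :: rs).zip (c :: rest'))]) hitems' hP' hHA2
        have hdr : pvChoose busy2 rem2 = rest'.drop rs.length := by
          rw [hdrop, hch]
          simp
        simp only [hfe, hsome, hnonempty, Bool.false_eq_true, if_false]
        have hzip : (room :: rs).zip ((c :: rest').take (rs.length + 1))
            = (room :: rs).zip (c :: rest') := by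
          simpa using zip_take_right (room :: rs) (c :: rest')
        rw [hrec, hdr, pvChunkLoop, if_pos hcur, hzip]
        simp
    · rw [if_neg hcur]
      simp only [List.foldl_nil]
      cases hch : pvChoose busy rem with
      | nil => simp [pvChunkLoop]
      | cons c rest' => rw [pvChunkLoop, if_neg hcur]; simp

-- with no rooms, A's fold never changes the accumulated schedule
theorem fold_rooms_nil (items : List (String × List String)) (slots : List Int) :
    ∀ (acc : List (Int × List (String × String × List String)) × PySem.Dict String Bool),
    (slots.foldl (fun acc slot =>
        let r := pvFillRooms [] items acc.2
        (if r.1.isEmpty then acc.1 else acc.1 ++ [(slot, r.1)], r.2)) acc).1 = acc.1 := by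
  induction slots with
  | nil => intro acc; rfl
  | cons s sl ih =>
    intro acc
    simp only [List.foldl_cons]
    have h : pvFillRooms [] items acc.2 = ([], acc.2) := rfl
    rw [ih]
    simp [h]

-- every item of the dict built from the association list is an element of that list
theorem mem_items_foldl_insert (l : List (String × List String)) :
    ∀ (d : PySem.Dict String (List String)) (p : String × List String),
    p ∈ (l.foldl (fun d q => d.insert q.1 q.2) d).items → p ∈ d.items ∨ p ∈ l := by
  induction l with
  | nil => intro d p h; exact Or.inl h
  | cons q l ih =>
    intro d p h
    rcases ih (d.insert q.1 q.2) p h with h | h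
    · rcases (PySem.Dict.mem_items_insert _ _ _ _).mp h with h | h
      · right; rw [h]; exact List.mem_cons_self
      · exact Or.inl h.1
    · right; exact List.mem_cons_of_mem _ h

theorem mem_items_ofList (l : List (String × List String)) (p : String × List String)
    (h : p ∈ (PySem.Dict.ofList l).items) : p ∈ l := by
  have h' : p ∈ (l.foldl (fun d q => d.insert q.1 q.2) PySem.Dict.empty).items := h
  rcases mem_items_foldl_insert l PySem.Dict.empty p h' with h'' | h''
  · cases h''
  · exact h''

-- ===== VERDICT (by name: the statement is the Claim_ definition above) =====
theorem plan_meetings_spec : Claim_equal_plan_meetings := by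
  intro ct st et dur rooms _hdom hpre
  unfold Spec_plan_meetings
  simp only [plan_meetings, plan_meetings_alt]
  cases hr : rooms.getD ["222", "223", "224"] with
  | nil => exact fold_rooms_nil (PySem.Dict.ofList ct).items (pvWhileSlots st et dur) _
  | cons room rs =>
    by_cases hst : st < et
    · have hdur : 0 < dur := hpre.1 hst
      have hne : ∀ c ∈ (PySem.Dict.ofList ct).items, c.2 ≠ [] := fun c hc =>
        hpre.2 hst (by rw [hr]; simp) c (mem_items_ofList ct c hc)
      have := pv_main et dur hdur room rs (PySem.Dict.ofList ct).items hne
        ((et - st).toNat) st rfl [] (PySem.Dict.ofList ct).items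
        (pvInitAvail (PySem.Dict.ofList ct).items) PySem.Set.empty []
        (by simp) (by simp) (pvHA_init _)
      simpa using this
    · rw [pvWhileSlots, if_neg hst]
      simp only [List.foldl_nil]
      cases hch : pvChoose PySem.Set.empty (PySem.Dict.ofList ct).items with
      | nil => simp [pvChunkLoop]
      | cons c rest' => rw [pvChunkLoop, if_neg hst]
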